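-- pv_equiv track=rewrite | github.com/rocadenis/Python | lab2.py | ex_4
-- ===== SOURCE A (Python) =====
-- def ex_4(a, b, startingNotePosition):
--     song = [a[startingNotePosition]]
--     position = startingNotePosition
--
--     for i in range(len(b)):
--         position += b[i]
--         if position >= len(a) or position < 0:
--             position = position % len(a)
--         song.append(a[position])
--
--     return song
-- ===== SOURCE B (Python) =====
-- def ex_4(a, b, startingNotePosition):
--     n = len(a)
--     first = a[startingNotePosition]
--     total = startingNotePosition + sum(b)
--     rev = []
--     for step in reversed(b):
--         rev.append(a[total % n])
--         total -= step
--     rev.append(first)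
--     rev.reverse()
--     return rev
-- ===== Notes on version B (the rewrite author's own statement) =====
-- stated objective: alternative
-- what changed: B builds the song back-to-front: it computes the final cumulative position once via sum(b), then traverses b in reverse subtracting each step and emitting a[total % n], and reverses the list at the end, instead of A's forward pass maintaining a clamped position and appending as it goes.
import Mathlib
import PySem

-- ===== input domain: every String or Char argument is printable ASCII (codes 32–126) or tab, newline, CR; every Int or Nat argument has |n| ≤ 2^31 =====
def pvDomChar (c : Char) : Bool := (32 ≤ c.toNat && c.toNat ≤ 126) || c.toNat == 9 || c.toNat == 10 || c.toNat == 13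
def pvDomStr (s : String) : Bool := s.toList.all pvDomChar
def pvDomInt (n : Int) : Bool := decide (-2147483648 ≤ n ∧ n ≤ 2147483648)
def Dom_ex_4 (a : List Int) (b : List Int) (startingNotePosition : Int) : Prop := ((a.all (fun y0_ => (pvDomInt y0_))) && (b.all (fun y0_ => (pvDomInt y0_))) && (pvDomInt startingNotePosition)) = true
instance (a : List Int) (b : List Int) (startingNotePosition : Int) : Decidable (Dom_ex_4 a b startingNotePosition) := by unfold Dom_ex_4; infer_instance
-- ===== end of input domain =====

-- B builds the song back-to-front: it computes the final cumulative position once via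
-- sum(b), then walks b in reverse, subtracting steps and emitting notes, and reverses
-- at the end — no forward running/clamped position state (objective: alternative).

-- ===== PORT A =====
def ex_4 (a : List Int) (b : List Int) (startingNotePosition : Int) : List Int :=
  let song := [PySem.List.pyGetD a startingNotePosition 0]
  let st := (PySem.List.pyRange 0 b.length 1).foldl
    (fun (st : List Int × Int) i =>
      let position := st.2 + PySem.List.pyGetD b i 0
      let position :=
        if position ≥ (a.length : Int) ∨ position < 0 then
          PySem.Int.mod position (a.length : Int)
        else position
      (st.1 ++ [PySem.List.pyGetD a position 0], position))
    (song, startingNotePosition)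
  st.1

-- ===== PORT B =====
def ex_4_alt (a : List Int) (b : List Int) (startingNotePosition : Int) : List Int :=
  let n : Int := a.length
  let first := PySem.List.pyGetD a startingNotePosition 0
  let rev := (b.reverse.foldl
    (fun (st : List Int × Int) step =>
      (st.1 ++ [PySem.List.pyGetD a (PySem.Int.mod st.2 n) 0], st.2 - step))
    ([], startingNotePosition + b.sum)).1
  (rev ++ [first]).reverse

-- ===== PRECONDITION & SPEC =====
-- Pre_ excludes exactly the inputs where Python's a[startingNotePosition] raises IndexError.
def Pre_ex_4 (a : List Int) (b : List Int) (startingNotePosition : Int) : Prop :=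
  PySem.Raise.InRange a.length startingNotePosition
instance (a : List Int) (b : List Int) (startingNotePosition : Int) : Decidable (Pre_ex_4 a b startingNotePosition) := by unfold Pre_ex_4; infer_instance
def pvWitness_ex_4 : List Int × List Int × Int := ([3, 1, 4, 1], [2, -7, 5], 1)

def Spec_ex_4 (a : List Int) (b : List Int) (startingNotePosition : Int) (out : List Int) : Prop := out = ex_4_alt a b startingNotePosition
instance (a : List Int) (b : List Int) (startingNotePosition : Int) (out : List Int) : Decidable (Spec_ex_4 a b startingNotePosition out) := by unfold Spec_ex_4; infer_instance

-- ===== CLAIM (what is proved, stated in full; the proofs are below) =====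
def Claim_equal_ex_4 : Prop := ∀ (a : List Int) (b : List Int) (startingNotePosition : Int), Dom_ex_4 a b startingNotePosition → Pre_ex_4 a b startingNotePosition → Spec_ex_4 a b startingNotePosition (ex_4 a b startingNotePosition)

-- ===== LEMMAS AND PROOFS =====

-- The body of A's loop, named so the pyRange/indexing bridge lemma can match it.
def pvG (a : List Int) (st : List Int × Int) (v : Int) : List Int × Int :=
  let position := st.2 + v
  let position :=
    if position ≥ (a.length : Int) ∨ position < 0 then
      PySem.Int.mod position (a.length : Int)
    else position
  (st.1 ++ [PySem.List.pyGetD a position 0], position)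

-- The body of B's reverse loop.
def pvF (a : List Int) (st : List Int × Int) (step : Int) : List Int × Int :=
  (st.1 ++ [PySem.List.pyGetD a (PySem.Int.mod st.2 (a.length : Int)) 0], st.2 - step)

-- The running cumulative positions s+b0, s+b0+b1, …
def pvPS (t : Int) : List Int → List Int
  | [] => []
  | x :: xs => (t + x) :: pvPS (t + x) xs

-- A's clamp equals an unconditional Python modulo when 0 < n.
theorem pv_clamp_eq_mod (q n : Int) (hn : 0 < n) :
    (if q ≥ n ∨ q < 0 then PySem.Int.mod q n else q) = PySem.Int.mod q n := by
  split_ifs with h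
  · rfl
  · push_neg at h
    rw [PySem.Int.mod_eq_emod_of_pos hn]
    exact (Int.emod_eq_of_lt (by omega) (by omega)).symm

-- A-side: the forward fold produces the mapped cumulative positions,
-- provided the carried position p agrees with the raw total t modulo n.
theorem pv_main (a : List Int) (hn : 0 < (a.length : Int)) (b : List Int) :
    ∀ (p t : Int), p % (a.length : Int) = t % (a.length : Int) → ∀ (acc : List Int),
    (b.foldl (pvG a) (acc, p)).1
    = acc ++ (pvPS t b).map
        (fun c => PySem.List.pyGetD a (PySem.Int.mod c (a.length : Int)) 0) := by
  induction b with
  | nil => intro p t _ acc; simp [pvPS]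
  | cons x xs ih =>
    intro p t hpt acc
    simp only [List.foldl_cons, pvG]
    rw [pv_clamp_eq_mod _ _ hn]
    have hmod : PySem.Int.mod (p + x) (a.length : Int)
        = PySem.Int.mod (t + x) (a.length : Int) := by
      rw [PySem.Int.mod_eq_emod_of_pos hn, PySem.Int.mod_eq_emod_of_pos hn]
      exact Int.ModEq.add_right x hpt
    have hinv : PySem.Int.mod (t + x) (a.length : Int) % (a.length : Int)
        = (t + x) % (a.length : Int) := by
      rw [PySem.Int.mod_eq_emod_of_pos hn]
      exact Int.emod_emod_of_dvd _ dvd_rfl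
    rw [hmod, ih _ (t + x) hinv]
    simp [pvPS]

-- B-side: the second component of the fold is start minus the sum of consumed steps.
theorem pv_snd (a : List Int) (l : List Int) :
    ∀ (acc : List Int) (t : Int), (l.foldl (pvF a) (acc, t)).2 = t - l.sum := by
  induction l with
  | nil => intro acc t; simp
  | cons x xs ih => intro acc t; simp only [List.foldl_cons, pvF]; rw [ih]; simp; ring

-- B-side: reversing the back-to-front fold yields the mapped cumulative positions.
theorem pv_rev (a : List Int) (b : List Int) :
    ∀ (t : Int),
    ((b.reverse.foldl (pvF a) ([], t + b.sum)).1).reverse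
    = (pvPS t b).map
        (fun c => PySem.List.pyGetD a (PySem.Int.mod c (a.length : Int)) 0) := by
  induction b with
  | nil => intro t; simp [pvPS]
  | cons x xs ih =>
    intro t
    have hstart : t + (x :: xs).sum = (t + x) + xs.sum := by simp; ring
    rw [List.reverse_cons, List.foldl_append, hstart]
    have h2 := pv_snd a xs.reverse ([] : List Int) ((t + x) + xs.sum)
    simp only [List.foldl_cons, List.foldl_nil, pvF]
    rw [h2]
    have hsum : (t + x) + xs.sum - xs.reverse.sum = t + x := by
      rw [List.sum_reverse]; ring
    rw [hsum, List.reverse_append]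
    rw [ih (t + x)]
    simp [pvPS]

-- ===== VERDICT (by name: the statement is the Claim_ definition above) =====
theorem ex_4_spec : Claim_equal_ex_4 := by
  intro a b s _ hpre
  unfold Spec_ex_4 ex_4 ex_4_alt
  have hn : 0 < (a.length : Int) := by
    unfold Pre_ex_4 PySem.Raise.InRange at hpre
    omega
  change ((PySem.List.pyRange 0 (b.length : Int) 1).foldl
      (fun st i => pvG a st (PySem.List.pyGetD b i 0))
      ([PySem.List.pyGetD a s 0], s)).1 = _
  rw [PySem.List.foldl_pyRange_pyGetD' b 0 (pvG a) ([PySem.List.pyGetD a s 0], s) (by omega)]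
  simp only [Int.toNat_zero, List.drop_zero]
  rw [pv_main a hn b s s rfl [PySem.List.pyGetD a s 0]]
  show _ = ((b.reverse.foldl (pvF a) ([], s + b.sum)).1
      ++ [PySem.List.pyGetD a s 0]).reverse
  rw [List.reverse_append, pv_rev a b s]
  simp
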